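-- pv_equiv track=rewrite | github.com/ericbgarnick/AOC | 2019/repeat/day08/src.py | find_fewest_zeroes
-- ===== SOURCE A (Python) =====
-- from typing import List, Dict, Iterable
--
-- IMAGE_WIDTH = 25
--
-- BLACK_DATA = "0"
--
-- def find_fewest_zeroes(layers: List[List[str]]) -> int:
--     """Return the index of the layer with the fewest zeroes."""
--     idx = None
--     min_num_zeroes = IMAGE_WIDTH
--     for i, layer in enumerate(layers):
--         cur_num_zeroes = sum(row.count(BLACK_DATA) for row in layer)
--         if cur_num_zeroes < min_num_zeroes:
--             min_num_zeroes = cur_num_zeroes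
--             idx = i
--     return idx
-- ===== SOURCE B (Python) =====
-- from typing import List
--
-- IMAGE_WIDTH = 25
--
-- BLACK_DATA = "0"
--
--
-- def find_fewest_zeroes(layers: List[List[str]]) -> int:
--     """Return the index of the layer with the fewest zeroes."""
--     counts = [sum(row.count(BLACK_DATA) for row in layer) for layer in layers]
--     if not counts:
--         return None
--     m = min(counts)
--     return counts.index(m) if m < IMAGE_WIDTH else None
-- ===== Notes on version B (the rewrite author's own statement) =====
-- stated objective: simpler
-- what changed: Replaces the single running-argmin loop carrying (idx, min_num_zeroes) state with a stateless two-pass form: build the list of per-layer zero counts, then take min() and counts.index() guarded by the < 25 threshold.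
import Mathlib
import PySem

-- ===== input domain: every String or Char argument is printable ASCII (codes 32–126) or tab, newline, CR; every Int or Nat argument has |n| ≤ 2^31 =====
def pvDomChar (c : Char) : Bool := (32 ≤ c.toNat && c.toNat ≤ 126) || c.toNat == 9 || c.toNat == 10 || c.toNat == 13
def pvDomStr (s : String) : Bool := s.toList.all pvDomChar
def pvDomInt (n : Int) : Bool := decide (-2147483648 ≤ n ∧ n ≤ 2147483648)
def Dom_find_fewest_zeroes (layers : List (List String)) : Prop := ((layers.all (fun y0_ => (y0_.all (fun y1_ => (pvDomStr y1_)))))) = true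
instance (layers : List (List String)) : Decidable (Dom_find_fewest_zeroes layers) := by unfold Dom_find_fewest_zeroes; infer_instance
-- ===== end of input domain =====

-- B replaces A's running-argmin loop with a stateless build-counts / min / index decomposition (objective: simpler).

-- ===== PORT A =====
-- literal port of A: one loop over enumerate(layers) carrying (idx, min_num_zeroes), starting at (None, 25)
def find_fewest_zeroes (layers : List (List String)) : Option Int :=
  ((PySem.List.enumerate layers).foldl
    (fun (st : Option Int × Int) (p : Int × List String) =>
      let cur : Int := p.2.foldl (fun acc row => acc + (PySem.Str.count row "0" : Int)) 0
      if cur < st.2 then (some p.1, cur) else st)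
    (none, 25)).1

-- ===== PORT B =====
-- literal port of B: counts list, empty guard, min, index if min < 25
def find_fewest_zeroes_alt (layers : List (List String)) : Option Int :=
  match PySem.List.min?
      (layers.map (fun layer => layer.foldl (fun acc row => acc + (PySem.Str.count row "0" : Int)) 0))
      (fun x => x) with
  | none => none
  | some m =>
      if m < 25 then
        (PySem.List.index?
          (layers.map (fun layer => layer.foldl (fun acc row => acc + (PySem.Str.count row "0" : Int)) 0))
          m).map (fun j => (j : Int))
      else none

-- ===== PRECONDITION & SPEC =====
def Spec_find_fewest_zeroes (layers : List (List String)) (out : Option Int) : Prop := out = find_fewest_zeroes_alt layers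
instance (layers : List (List String)) (out : Option Int) : Decidable (Spec_find_fewest_zeroes layers out) := by unfold Spec_find_fewest_zeroes; infer_instance

-- ===== CLAIM (what is proved, stated in full; the proofs are below) =====
def Claim_equal_find_fewest_zeroes : Prop := ∀ (layers : List (List String)), Dom_find_fewest_zeroes layers → Spec_find_fewest_zeroes layers (find_fewest_zeroes layers)

-- ===== LEMMAS AND PROOFS =====

-- per-layer zero count (definitionally the counting expression used in both ports)
def pvZc (layer : List String) : Int :=
  layer.foldl (fun acc row => acc + (PySem.Str.count row "0" : Int)) 0

-- A's loop, recursively over the list of counts with an explicit index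
def pvFoldA (cs : List Int) (k : Int) (st : Option Int × Int) : Option Int × Int :=
  match cs with
  | [] => st
  | c :: t => pvFoldA t (k + 1) (if c < st.2 then (some k, c) else st)

lemma pvFoldA_eq (layers : List (List String)) : ∀ (k : Int) (st : Option Int × Int),
    (PySem.List.enumerate layers k).foldl
      (fun (st : Option Int × Int) (p : Int × List String) =>
        let cur : Int := p.2.foldl (fun acc row => acc + (PySem.Str.count row "0" : Int)) 0
        if cur < st.2 then (some p.1, cur) else st)
      st = pvFoldA (layers.map pvZc) k st := by
  induction layers with
  | nil => intro k st; simp [PySem.List.enumerate_nil, pvFoldA]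
  | cons l t ih =>
      intro k st
      rw [PySem.List.enumerate_cons]
      simp only [List.foldl_cons, List.map_cons, pvFoldA]
      exact ih (k + 1) _

lemma pvFoldlMin_le (t : List Int) (a : Int) : t.foldl min a ≤ a :=
  (PySem.List.foldl_min_le t a).1

lemma pvFoldlMin_assoc (t : List Int) : ∀ (a b : Int),
    t.foldl min (min a b) = min a (t.foldl min b) := by
  induction t with
  | nil => intro a b; simp
  | cons x t ih =>
      intro a b
      simp only [List.foldl_cons]
      rw [min_assoc, ih]

-- characterisation of A's loop in terms of foldl min and index?
lemma pvFoldA_spec (cs : List Int) : ∀ (k : Int) (o : Option Int) (m0 : Int),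
    pvFoldA cs k (o, m0) =
      ((if cs.foldl min m0 < m0 then
          (PySem.List.index? cs (cs.foldl min m0)).map (fun j => k + (j : Int))
        else o), cs.foldl min m0) := by
  induction cs with
  | nil => intro k o m0; simp [pvFoldA]
  | cons c t ih =>
      intro k o m0
      simp only [pvFoldA, List.foldl_cons]
      by_cases hc : c < m0
      · rw [if_pos hc]
        rw [ih (k + 1) (some k) c]
        have hle : t.foldl min c ≤ c := pvFoldlMin_le t c
        have hmin : min m0 c = c := min_eq_right (le_of_lt hc)
        rw [hmin]
        have hlt : t.foldl min c < m0 := lt_of_le_of_lt hle hc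
        rw [if_pos hlt]
        by_cases h2 : t.foldl min c < c
        · rw [if_pos h2]
          have hne : c ≠ t.foldl min c := (ne_of_gt h2)
          rw [PySem.List.index?_cons_of_ne t hne]
          cases PySem.List.index? t (List.foldl min c t) with
          | none => simp
          | some j => simp; omega
        · rw [if_neg h2]
          have hceq : t.foldl min c = c := le_antisymm hle (not_lt.mp h2)
          rw [hceq, PySem.List.index?_cons_self]
          simp
      · rw [if_neg hc]
        rw [ih (k + 1) o m0]
        have hm0 : min m0 c = m0 := min_eq_left (not_lt.mp hc)
        rw [hm0]
        by_cases h2 : t.foldl min m0 < m0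
        · rw [if_pos h2, if_pos h2]
          have hne : c ≠ t.foldl min m0 :=
            ne_of_gt (lt_of_lt_of_le h2 (not_lt.mp hc))
          rw [PySem.List.index?_cons_of_ne t hne]
          cases PySem.List.index? t (List.foldl min m0 t) with
          | none => simp
          | some j => simp; omega
        · rw [if_neg h2, if_neg h2]

-- ===== VERDICT (by name: the statement is the Claim_ definition above) =====
theorem find_fewest_zeroes_spec : Claim_equal_find_fewest_zeroes := by
  intro layers _
  show find_fewest_zeroes layers = find_fewest_zeroes_alt layers
  unfold find_fewest_zeroes find_fewest_zeroes_alt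
  rw [pvFoldA_eq layers 0 (none, 25)]
  cases hmap : layers.map pvZc with
  | nil =>
      have hmap' : layers.map (fun layer => layer.foldl (fun acc row => acc + (PySem.Str.count row "0" : Int)) 0) = [] := hmap
      rw [hmap']
      simp [pvFoldA, PySem.List.min?]
  | cons c t =>
      have hmap' : layers.map (fun layer => layer.foldl (fun acc row => acc + (PySem.Str.count row "0" : Int)) 0) = c :: t := hmap
      rw [hmap', pvFoldA_spec, PySem.List.min?_id_cons]
      have h25 : List.foldl min 25 (c :: t) = min 25 (List.foldl min c t) := by
        simp only [List.foldl_cons]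
        exact pvFoldlMin_assoc t 25 c
      rw [h25]
      by_cases hm : List.foldl min c t < 25
      · cases h : PySem.List.index? (c :: t) (List.foldl min c t) with
        | none =>
            simp only [PySem.List.index?_eq_idxOf?] at h
            rw [min_eq_right (le_of_lt hm), if_pos hm]
            simp [hm, h]
        | some j =>
            simp only [PySem.List.index?_eq_idxOf?] at h
            rw [min_eq_right (le_of_lt hm), if_pos hm]
            simp [hm, h]
      · rw [min_eq_left (not_lt.mp hm), if_neg (lt_irrefl (25 : Int))]
        simp [hm]
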